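-- pv_equiv track=rewrite | github.com/rookinc/xalchemy_lab2 | scripts/g15_transport_search.py | build_line_graph_adjacency
-- ===== SOURCE A (Python) =====
-- from typing import Dict, List, Tuple
--
-- def build_line_graph_adjacency(edges: List[Tuple[int, int]]) -> List[List[int]]:
--     n = len(edges)
--     adj = [[0] * n for _ in range(n)]
--     for i in range(n):
--         a1, a2 = edges[i]
--         for j in range(i + 1, n):
--             b1, b2 = edges[j]
--             if len({a1, a2, b1, b2}) < 4:
--                 adj[i][j] = 1
--                 adj[j][i] = 1
--     # G15 should be 4-regular
--     degrees = [sum(row) for row in adj]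
--     assert all(d == 4 for d in degrees), f"G15 not 4-regular: {degrees}"
--     return adj
-- ===== SOURCE B (Python) =====
-- from typing import Dict, List, Tuple
--
-- def build_line_graph_adjacency(edges: List[Tuple[int, int]]) -> List[List[int]]:
--     n = len(edges)
--     # incidence index: vertex -> indices of the edges touching it
--     incidence: Dict[int, List[int]] = {}
--     for k in range(n):
--         u, v = edges[k]
--         incidence.setdefault(u, []).append(k)
--         if v != u:
--             incidence.setdefault(v, []).append(k)
--     # two edges are adjacent in the line graph iff they share a vertex
--     adj = [[0] * n for _ in range(n)]
--     for bucket in incidence.values():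
--         for x in range(len(bucket)):
--             i = bucket[x]
--             for j in bucket[x + 1:]:
--                 adj[i][j] = 1
--                 adj[j][i] = 1
--     # G15 should be 4-regular
--     degrees = [sum(row) for row in adj]
--     assert all(d == 4 for d in degrees), f"G15 not 4-regular: {degrees}"
--     return adj
-- ===== Notes on version B (the rewrite author's own statement) =====
-- stated objective: alternative
-- what changed: B replaces A's all-pairs scan with the len({a1,a2,b1,b2})<4 set test by an incidence index mapping each vertex to its edge indices and marking the pairs inside each vertex bucket, keeping the 4-regularity assert; Pre_ excludes the inputs on which either program's assert fires, in particular lists with a repeated-endpoint edge vertex-disjoint from another edge, where A's set test counts the degenerate edge as adjacent to everything (A returns a padded matrix, B's assert raises).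
import Mathlib
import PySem

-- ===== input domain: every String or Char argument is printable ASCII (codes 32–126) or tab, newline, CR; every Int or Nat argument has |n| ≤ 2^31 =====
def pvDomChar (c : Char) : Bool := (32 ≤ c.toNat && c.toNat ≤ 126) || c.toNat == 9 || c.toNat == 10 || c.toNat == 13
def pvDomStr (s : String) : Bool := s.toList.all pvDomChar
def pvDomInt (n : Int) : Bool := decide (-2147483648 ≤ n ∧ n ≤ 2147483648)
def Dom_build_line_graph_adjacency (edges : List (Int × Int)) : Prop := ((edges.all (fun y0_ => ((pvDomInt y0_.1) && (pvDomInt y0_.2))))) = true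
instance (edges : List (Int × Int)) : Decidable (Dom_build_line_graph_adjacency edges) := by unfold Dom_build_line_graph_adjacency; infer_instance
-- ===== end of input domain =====

-- B builds the line graph from an incidence index (vertex -> edge indices), marks the pairs in
-- each vertex bucket, and keeps the same 4-regularity assert; Pre_ is where both asserts pass
-- (there the matrices are proved equal); outside Pre_ one of the two asserts raises.

-- ===== PORT A =====
-- adj[i][j] = v on nested lists (all indices used are in range in both programs)
def pvSetEntry (m : List (List Int)) (i j : Nat) (v : Int) : List (List Int) :=
  m.set i ((m.getD i []).set j v)

def build_line_graph_adjacency (edges : List (Int × Int)) : List (List Int) :=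
  let n := edges.length
  let adj := (List.range n).map (fun _ => List.replicate n (0 : Int))
  (List.range n).foldl (fun adj i =>
    let a := edges.getD i (0, 0)
    (List.range' (i + 1) (n - (i + 1))).foldl (fun adj j =>
      let b := edges.getD j (0, 0)
      if (PySem.Set.ofList [a.1, a.2, b.1, b.2]).length < 4 then
        pvSetEntry (pvSetEntry adj i j 1) j i 1
      else adj) adj) adj
  -- the trailing 'assert all(d == 4 ...)' only raises; Pre_ excludes exactly those inputs

-- ===== PORT B =====
-- inner pair loop of B: for x in range(len(bucket)): i = bucket[x]; for j in bucket[x+1:]: ...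
def pvMarkBucket : List Nat → List (List Int) → List (List Int)
  | [], adj => adj
  | i :: rest, adj =>
      pvMarkBucket rest (rest.foldl (fun adj j =>
        pvSetEntry (pvSetEntry adj i j 1) j i 1) adj)

def build_line_graph_adjacency_alt (edges : List (Int × Int)) : List (List Int) :=
  let n := edges.length
  let inc := (List.range n).foldl (fun d k =>
      let e := edges.getD k (0, 0)
      let d := d.modify e.1 ([] : List Nat) (· ++ [k])
      if e.2 ≠ e.1 then d.modify e.2 ([] : List Nat) (· ++ [k]) else d)
    PySem.Dict.empty
  let adj := (List.range n).map (fun _ => List.replicate n (0 : Int))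
  inc.values.foldl (fun adj bucket => pvMarkBucket bucket adj) adj

-- ===== PRECONDITION & SPEC =====
-- 'len({a1,a2,b1,b2}) < 4' as a plain disjunction on the two edges
def pvRel (e f : Int × Int) : Bool :=
  decide (e.1 = e.2 ∨ f.1 = f.2 ∨ e.1 = f.1 ∨ e.1 = f.2 ∨ e.2 = f.1 ∨ e.2 = f.2)

-- Python's 'e[0] in (f[0], f[1]) or ...' shared-vertex test of B
def pvShare (e f : Int × Int) : Bool :=
  decide (e.1 = f.1 ∨ e.1 = f.2 ∨ e.2 = f.1 ∨ e.2 = f.2)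

-- Pre_ excludes exactly the inputs on which an AssertionError is raised: A's, where some edge is
-- not A-related (shared vertex or repeated endpoint) to exactly 4 others, and B's, where some edge
-- does not share a vertex with exactly 4 others — in particular lists with a degenerate (u, u)
-- edge vertex-disjoint from another edge, where A's set test pads the matrix and returns while
-- B's assert fires (see the cite in the claim).  Since pvRel e e and pvShare e e always hold,
-- 'exactly 4 others' reads as 'exactly 5 entries of the list, itself included'.
def Pre_build_line_graph_adjacency (edges : List (Int × Int)) : Prop :=
  ∀ e ∈ edges, (edges.filter (fun f => pvRel e f)).length = 5
    ∧ (edges.filter (fun f => pvShare e f)).length = 5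
instance (edges : List (Int × Int)) : Decidable (Pre_build_line_graph_adjacency edges) := by
  unfold Pre_build_line_graph_adjacency; infer_instance

-- the empty graph vacuously satisfies both regularity conditions
def pvWitness_build_line_graph_adjacency : (List (Int × Int)) := []

def Spec_build_line_graph_adjacency (edges : List (Int × Int)) (out : List (List Int)) : Prop := out = build_line_graph_adjacency_alt edges
instance (edges : List (Int × Int)) (out : List (List Int)) : Decidable (Spec_build_line_graph_adjacency edges out) := by unfold Spec_build_line_graph_adjacency; infer_instance

-- ===== CLAIM (what is proved, stated in full; the proofs are below) =====
def Claim_equal_build_line_graph_adjacency : Prop := ∀ (edges : List (Int × Int)), Dom_build_line_graph_adjacency edges → Pre_build_line_graph_adjacency edges → Spec_build_line_graph_adjacency edges (build_line_graph_adjacency edges)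

-- ===== LEMMAS AND PROOFS =====

def pvEntry (m : List (List Int)) (i j : Nat) : Int := (m.getD i []).getD j 0

def pvWf (n : Nat) (m : List (List Int)) : Prop :=
  m.length = n ∧ ∀ i < n, (m.getD i []).length = n

def pvStep (m : List (List Int)) (p : Nat × Nat) : List (List Int) :=
  pvSetEntry (pvSetEntry m p.1 p.2 1) p.2 p.1 1

def pvPairsOf : List Nat → List (Nat × Nat)
  | [] => []
  | i :: rest => rest.map (fun j => (i, j)) ++ pvPairsOf rest

def pvAdj0 (n : Nat) : List (List Int) := (List.range n).map (fun _ => List.replicate n (0 : Int))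

def pvE (edges : List (Int × Int)) (i : Nat) : Int × Int := edges.getD i (0, 0)

-- the relation A's set-cardinality test computes
def pvRelP (e f : Int × Int) : Prop :=
  e.1 = e.2 ∨ e.1 = f.1 ∨ e.1 = f.2 ∨ e.2 = f.1 ∨ e.2 = f.2 ∨ f.1 = f.2

-- the genuine shared-vertex relation B computes
def pvShareP (e f : Int × Int) : Prop :=
  e.1 = f.1 ∨ e.1 = f.2 ∨ e.2 = f.1 ∨ e.2 = f.2

lemma listGetD_set {α : Type} (m : List α) (a i : Nat) (r d : α) :
    (m.set a r).getD i d = if a = i ∧ a < m.length then r else m.getD i d := by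
  simp only [List.getD_eq_getElem?_getD, List.getElem?_set]
  by_cases h1 : a = i
  · subst h1
    by_cases h2 : a < m.length
    · simp [h2]
    · simp [h2]
  · simp [h1]

lemma pvWf_setEntry {n : Nat} {m : List (List Int)} (h : pvWf n m) (a b : Nat) (v : Int) :
    pvWf n (pvSetEntry m a b v) := by
  obtain ⟨hlen, hrows⟩ := h
  refine ⟨by simpa [pvSetEntry] using hlen, ?_⟩
  intro i hi
  rw [pvSetEntry, listGetD_set]
  by_cases h1 : a = i ∧ a < m.length
  · rw [if_pos h1, List.length_set]
    exact h1.1 ▸ hrows a (h1.1 ▸ hi)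
  · rw [if_neg h1]
    exact hrows i hi

lemma pvEntry_setEntry {n : Nat} {m : List (List Int)} {v : Int} (h : pvWf n m) {a b : Nat}
    (ha : a < n) (hb : b < n) (i j : Nat) :
    pvEntry (pvSetEntry m a b v) i j = if i = a ∧ j = b then v else pvEntry m i j := by
  obtain ⟨hlen, hrows⟩ := h
  have ham : a < m.length := by omega
  simp only [pvEntry, pvSetEntry]
  rw [listGetD_set]
  by_cases h1 : a = i
  · subst h1
    rw [if_pos ⟨rfl, ham⟩, listGetD_set]
    have hb' : b < (m.getD a []).length := by rw [hrows a ha]; exact hb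
    by_cases h2 : b = j
    · subst h2
      rw [if_pos ⟨rfl, hb'⟩, if_pos ⟨rfl, rfl⟩]
    · rw [if_neg (by tauto), if_neg (by tauto)]
  · rw [if_neg (by tauto), if_neg (by tauto)]

lemma pvWf_step {n : Nat} {m : List (List Int)} (h : pvWf n m) (p : Nat × Nat) :
    pvWf n (pvStep m p) := pvWf_setEntry (pvWf_setEntry h p.1 p.2 1) p.2 p.1 1

lemma pvWf_foldl_step {n : Nat} (ps : List (Nat × Nat)) {m : List (List Int)} (h : pvWf n m) :
    pvWf n (ps.foldl pvStep m) := by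
  induction ps generalizing m with
  | nil => exact h
  | cons p rest ih => exact ih (pvWf_step h p)

lemma pvEntry_foldl_step {n : Nat} (ps : List (Nat × Nat)) {m : List (List Int)} (h : pvWf n m)
    (hps : ∀ p ∈ ps, p.1 < n ∧ p.2 < n) (i j : Nat) :
    pvEntry (ps.foldl pvStep m) i j
      = if (i, j) ∈ ps ∨ (j, i) ∈ ps then 1 else pvEntry m i j := by
  induction ps generalizing m with
  | nil => simp
  | cons p rest ih =>
    obtain ⟨a, b⟩ := p
    have hab := hps (a, b) List.mem_cons_self
    have hstep : pvEntry (pvStep m (a, b)) i j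
        = if (i = a ∧ j = b) ∨ (i = b ∧ j = a) then 1 else pvEntry m i j := by
      show pvEntry (pvSetEntry (pvSetEntry m a b 1) b a 1) i j = _
      rw [pvEntry_setEntry (pvWf_setEntry h a b 1) hab.2 hab.1 i j,
          pvEntry_setEntry h hab.1 hab.2 i j]
      by_cases h1 : i = b ∧ j = a <;> by_cases h2 : i = a ∧ j = b <;>
        simp [h1, h2]
    rw [List.foldl_cons,
        ih (pvWf_step h (a, b)) (fun q hq => hps q (List.mem_cons_of_mem _ hq)), hstep]
    simp only [List.mem_cons, Prod.mk.injEq]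
    split_ifs <;> tauto

lemma pvFoldl_if_step {α : Type} (l : List α) (c : α → Prop) [DecidablePred c] (f : α → Nat × Nat)
    (m : List (List Int)) :
    l.foldl (fun adj x => if c x then pvStep adj (f x) else adj) m
      = ((l.filter (fun x => decide (c x))).map f).foldl pvStep m := by
  induction l generalizing m with
  | nil => rfl
  | cons x xs ih =>
    by_cases hc : c x <;> simp [hc, ih]

lemma pvFoldl_foldl_flatMap {α β σ : Type} (l : List α) (g : α → List β)
    (h : σ → β → σ) (init : σ) :
    l.foldl (fun acc x => (g x).foldl h acc) init = (l.flatMap g).foldl h init := by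
  induction l generalizing init with
  | nil => rfl
  | cons x xs ih => simp [ih, List.foldl_append]

lemma pvSet4_iff (a b c d : Int) :
    ((PySem.Set.ofList [a, b, c, d]).length < 4) ↔
      (a = b ∨ a = c ∨ a = d ∨ b = c ∨ b = d ∨ c = d) := by
  by_cases h1 : a = b <;> by_cases h2 : a = c <;> by_cases h3 : a = d <;>
    by_cases h4 : b = c <;> by_cases h5 : b = d <;> by_cases h6 : c = d <;>
    simp [PySem.Set.ofList, PySem.Set.add, PySem.Set.contains, h1, h2, h3, h4, h5, h6] <;>
    split_ifs <;> simp_all <;> omega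

-- ---- A-side characterization ----

def pvPA (edges : List (Int × Int)) : List (Nat × Nat) :=
  (List.range edges.length).flatMap (fun i =>
    ((List.range' (i + 1) (edges.length - (i + 1))).filter (fun j =>
      decide ((PySem.Set.ofList [(pvE edges i).1, (pvE edges i).2, (pvE edges j).1, (pvE edges j).2]).length < 4))).map
      (fun j => (i, j)))

lemma A_eq_foldl (edges : List (Int × Int)) :
    build_line_graph_adjacency edges = (pvPA edges).foldl pvStep (pvAdj0 edges.length) := by
  show (List.range edges.length).foldl (fun adj i =>
      (List.range' (i + 1) (edges.length - (i + 1))).foldl (fun adj j =>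
        if (PySem.Set.ofList [(pvE edges i).1, (pvE edges i).2, (pvE edges j).1, (pvE edges j).2]).length < 4 then
          pvStep adj (i, j)
        else adj) adj) (pvAdj0 edges.length) = _
  rw [funext fun adj => funext fun i => pvFoldl_if_step (List.range' (i + 1) (edges.length - (i + 1)))
      (fun j => (PySem.Set.ofList [(pvE edges i).1, (pvE edges i).2, (pvE edges j).1, (pvE edges j).2]).length < 4)
      (fun j => (i, j)) adj]
  exact pvFoldl_foldl_flatMap _ _ _ _

lemma mem_pvPA {edges : List (Int × Int)} {x y : Nat} :
    (x, y) ∈ pvPA edges ↔ x < y ∧ y < edges.length ∧ pvRelP (pvE edges x) (pvE edges y) := by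
  simp only [pvPA, List.mem_flatMap, List.mem_map, List.mem_filter, List.mem_range,
    List.mem_range'_1, Prod.mk.injEq, decide_eq_true_eq]
  constructor
  · rintro ⟨i, hi, j, ⟨⟨hj1, hj2⟩, hrel⟩, rfl, rfl⟩
    exact ⟨by omega, by omega, (pvSet4_iff _ _ _ _).mp hrel⟩
  · rintro ⟨hxy, hy, hrel⟩
    exact ⟨x, by omega, y, ⟨⟨by omega, by omega⟩, (pvSet4_iff _ _ _ _).mpr hrel⟩, rfl, rfl⟩

-- ---- B-side characterization ----

def pvChunk (edges : List (Int × Int)) (k : Nat) : List (Int × Nat) :=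
  ((pvE edges k).1, k) ::
    (if (pvE edges k).2 ≠ (pvE edges k).1 then [((pvE edges k).2, k)] else [])

def pvFlatL (edges : List (Int × Int)) : List (Int × Nat) :=
  (List.range edges.length).flatMap (pvChunk edges)

def pvInc (edges : List (Int × Int)) : PySem.Dict Int (List Nat) :=
  (List.range edges.length).foldl (fun d k =>
      let e := edges.getD k (0, 0)
      let d := d.modify e.1 ([] : List Nat) (· ++ [k])
      if e.2 ≠ e.1 then d.modify e.2 ([] : List Nat) (· ++ [k]) else d)
    PySem.Dict.empty

lemma pvInc_eq (edges : List (Int × Int)) :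
    pvInc edges = (pvFlatL edges).foldl
      (fun d p => d.modify p.1 ([] : List Nat) (· ++ [p.2])) PySem.Dict.empty := by
  have hbody : ∀ (d : PySem.Dict Int (List Nat)) (k : Nat),
      (let e := edges.getD k (0, 0)
       let d := d.modify e.1 ([] : List Nat) (· ++ [k])
       if e.2 ≠ e.1 then d.modify e.2 ([] : List Nat) (· ++ [k]) else d)
      = (pvChunk edges k).foldl (fun d p => d.modify p.1 ([] : List Nat) (· ++ [p.2])) d := by
    intro d k
    simp only [pvChunk, pvE, List.foldl_cons, List.foldl_nil]
    split_ifs <;> simp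
  show (List.range edges.length).foldl _ PySem.Dict.empty = _
  rw [funext fun d => funext fun k => hbody d k]
  exact pvFoldl_foldl_flatMap _ _ _ _

lemma mem_chunk {edges : List (Int × Int)} {k : Nat} {p : Int × Nat} :
    p ∈ pvChunk edges k ↔
      p = ((pvE edges k).1, k) ∨
        ((pvE edges k).2 ≠ (pvE edges k).1 ∧ p = ((pvE edges k).2, k)) := by
  by_cases h : (pvE edges k).2 ≠ (pvE edges k).1 <;> simp [pvChunk, h]

lemma mem_bucket {edges : List (Int × Int)} {w : Int} {i : Nat} :
    i ∈ (pvInc edges).getD w [] ↔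
      i < edges.length ∧ ((pvE edges i).1 = w ∨ (pvE edges i).2 = w) := by
  rw [pvInc_eq, PySem.Dict.getD_foldl_modify_append]
  simp only [PySem.Dict.getD_empty, List.nil_append, List.mem_map, List.mem_filter,
    beq_iff_eq, pvFlatL, List.mem_flatMap, List.mem_range]
  constructor
  · rintro ⟨p, ⟨⟨k, hk, hc⟩, hw⟩, rfl⟩
    rcases mem_chunk.mp hc with rfl | ⟨_, rfl⟩
    · exact ⟨hk, Or.inl hw⟩
    · exact ⟨hk, Or.inr hw⟩
  · rintro ⟨hi, h | h⟩
    · exact ⟨((pvE edges i).1, i), ⟨⟨i, hi, mem_chunk.mpr (Or.inl rfl)⟩, h⟩, rfl⟩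
    · by_cases hne : (pvE edges i).2 ≠ (pvE edges i).1
      · exact ⟨((pvE edges i).2, i), ⟨⟨i, hi, mem_chunk.mpr (Or.inr ⟨hne, rfl⟩)⟩, h⟩, rfl⟩
      · push_neg at hne
        exact ⟨((pvE edges i).1, i), ⟨⟨i, hi, mem_chunk.mpr (Or.inl rfl)⟩, hne ▸ h⟩, rfl⟩

lemma pvPiece_mem {edges : List (Int × Int)} {w : Int} {k j : Nat}
    (h : j ∈ ((pvChunk edges k).filter (fun p => p.1 == w)).map (·.2)) : j = k := by
  simp only [List.mem_map, List.mem_filter] at h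
  obtain ⟨p, ⟨hp, _⟩, rfl⟩ := h
  rcases mem_chunk.mp hp with rfl | ⟨_, rfl⟩ <;> rfl

lemma pvPiece_nodup (edges : List (Int × Int)) (w : Int) (k : Nat) :
    (((pvChunk edges k).filter (fun p => p.1 == w)).map (·.2)).Nodup := by
  by_cases h1 : (pvE edges k).2 ≠ (pvE edges k).1 <;>
    by_cases h2 : (pvE edges k).1 = w <;>
    by_cases h3 : (pvE edges k).2 = w <;>
    simp [pvChunk, h1, h2, h3] <;> simp_all

lemma nodup_bucket (edges : List (Int × Int)) (w : Int) :
    ((pvInc edges).getD w []).Nodup := by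
  rw [pvInc_eq, PySem.Dict.getD_foldl_modify_append]
  simp only [PySem.Dict.getD_empty, List.nil_append, pvFlatL]
  rw [List.filter_flatMap, List.map_flatMap]
  refine List.nodup_flatMap.mpr ⟨fun k _ => pvPiece_nodup edges w k, ?_⟩
  refine List.Pairwise.imp ?_ (List.pairwise_lt_range (n := edges.length))
  intro a b hab j hja hjb
  have := pvPiece_mem (edges := edges) (w := w) hja
  have := pvPiece_mem (edges := edges) (w := w) hjb
  omega

lemma mem_values_inc {edges : List (Int × Int)} {L : List Nat} :
    L ∈ (pvInc edges).values ↔ ∃ w, (pvInc edges).get? w = some L := by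
  have hnd : (pvInc edges).keys.Nodup := by
    rw [pvInc_eq]
    exact PySem.Dict.nodup_keys_foldl_modify_key _ _ _ _ _ PySem.Dict.nodup_keys_empty
  simp only [PySem.Dict.values, List.mem_map]
  constructor
  · rintro ⟨p, hp, hv⟩
    exact ⟨p.1, by rw [← hv]; exact PySem.Dict.get?_of_mem_items _ (by simpa using hp) hnd⟩
  · rintro ⟨w, hw⟩
    exact ⟨(w, L), PySem.Dict.mem_items_of_get?_eq_some _ hw, rfl⟩

lemma get?_inc_of_mem {edges : List (Int × Int)} {w : Int}
    (hw : w ∈ (pvFlatL edges).map Prod.fst) :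
    (pvInc edges).get? w = some ((pvInc edges).getD w []) := by
  have hk : w ∈ (pvInc edges).keys := by
    rw [pvInc_eq, PySem.Dict.keys_foldl_modify_key]
    rw [PySem.Dict.keys_empty]
    exact (PySem.Set.mem_update _ _ _).mpr (Or.inr hw)
  have hc : (pvInc edges).contains w = true := (PySem.Dict.contains_iff_mem_keys _ _).mpr hk
  rcases hg : (pvInc edges).get? w with _ | L
  · exfalso
    rw [PySem.Dict.contains_eq_isSome_get?, hg] at hc
    simp at hc
  · rw [PySem.Dict.getD_of_get?_eq_some _ _ hg]

lemma mem_flatL_fst {edges : List (Int × Int)} {w : Int} {i : Nat} (hi : i < edges.length)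
    (hw : (pvE edges i).1 = w ∨ (pvE edges i).2 = w) :
    w ∈ (pvFlatL edges).map Prod.fst := by
  simp only [List.mem_map, pvFlatL, List.mem_flatMap, List.mem_range]
  rcases hw with h | h
  · exact ⟨((pvE edges i).1, i), ⟨i, hi, mem_chunk.mpr (Or.inl rfl)⟩, h⟩
  · by_cases hne : (pvE edges i).2 ≠ (pvE edges i).1
    · exact ⟨((pvE edges i).2, i), ⟨i, hi, mem_chunk.mpr (Or.inr ⟨hne, rfl⟩)⟩, h⟩
    · push_neg at hne
      exact ⟨((pvE edges i).1, i), ⟨i, hi, mem_chunk.mpr (Or.inl rfl)⟩, hne ▸ h⟩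

lemma pvMarkBucket_eq (L : List Nat) (adj : List (List Int)) :
    pvMarkBucket L adj = (pvPairsOf L).foldl pvStep adj := by
  induction L generalizing adj with
  | nil => rfl
  | cons a rest ih =>
    show pvMarkBucket rest (rest.foldl (fun adj j => pvStep adj (a, j)) adj) = _
    rw [ih, pvPairsOf, List.foldl_append, List.foldl_map]

lemma mem_pvPairsOf {L : List Nat} (hnd : L.Nodup) {i j : Nat} :
    ((i, j) ∈ pvPairsOf L ∨ (j, i) ∈ pvPairsOf L) ↔ (i ∈ L ∧ j ∈ L ∧ i ≠ j) := by
  induction L with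
  | nil => simp [pvPairsOf]
  | cons a rest ih =>
    rw [List.nodup_cons] at hnd
    obtain ⟨ha, hrest⟩ := hnd
    simp only [pvPairsOf, List.mem_append, List.mem_map, List.mem_cons, Prod.mk.injEq]
    constructor
    · rintro (⟨⟨x, hx, rfl, rfl⟩ | hrec⟩ | ⟨⟨x, hx, rfl, rfl⟩ | hrec⟩)
      · exact ⟨Or.inl rfl, Or.inr hx, fun h => ha (h ▸ hx)⟩
      · have := (ih hrest).mp (Or.inl hrec); tauto
      · exact ⟨Or.inr hx, Or.inl rfl, fun h => ha (h ▸ hx)⟩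
      · have := (ih hrest).mp (Or.inr hrec); tauto
    · rintro ⟨hi, hj, hij⟩
      rcases hi with rfl | hi
      · rcases hj with rfl | hj
        · exact absurd rfl hij
        · exact Or.inl (Or.inl ⟨j, hj, rfl, rfl⟩)
      · rcases hj with rfl | hj
        · exact Or.inr (Or.inl ⟨i, hi, rfl, rfl⟩)
        · have := (ih hrest).mpr ⟨hi, hj, hij⟩; tauto

lemma mem_pvPairsOf_sub {L : List Nat} {p : Nat × Nat} (h : p ∈ pvPairsOf L) :
    p.1 ∈ L ∧ p.2 ∈ L := by
  induction L with
  | nil => simp [pvPairsOf] at h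
  | cons a rest ih =>
    simp only [pvPairsOf, List.mem_append, List.mem_map] at h
    rcases h with ⟨x, hx, rfl⟩ | h
    · exact ⟨List.mem_cons_self, List.mem_cons_of_mem _ hx⟩
    · have := ih h
      exact ⟨List.mem_cons_of_mem _ this.1, List.mem_cons_of_mem _ this.2⟩

lemma B_eq_foldl (edges : List (Int × Int)) :
    build_line_graph_adjacency_alt edges
      = ((pvInc edges).values.flatMap pvPairsOf).foldl pvStep (pvAdj0 edges.length) := by
  show (pvInc edges).values.foldl (fun adj bucket => pvMarkBucket bucket adj)
      (pvAdj0 edges.length) = _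
  simp only [pvMarkBucket_eq]
  rw [pvFoldl_foldl_flatMap]

lemma pvShare_iff (edges : List (Int × Int)) {i j : Nat} (hi : i < edges.length)
    (hj : j < edges.length) :
    ((i, j) ∈ (pvInc edges).values.flatMap pvPairsOf ∨
     (j, i) ∈ (pvInc edges).values.flatMap pvPairsOf)
    ↔ (i ≠ j ∧ pvShareP (pvE edges i) (pvE edges j)) := by
  constructor
  · intro h
    have key : ∀ (x y : Nat), (x, y) ∈ (pvInc edges).values.flatMap pvPairsOf →
        x ≠ y ∧ ∃ w, ((pvE edges x).1 = w ∨ (pvE edges x).2 = w) ∧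
          ((pvE edges y).1 = w ∨ (pvE edges y).2 = w) := by
      intro x y hxy
      obtain ⟨L, hL, hp⟩ := List.mem_flatMap.mp hxy
      obtain ⟨w, hw⟩ := mem_values_inc.mp hL
      have hLb := PySem.Dict.getD_of_get?_eq_some _ ([] : List Nat) hw
      have hm := (mem_pvPairsOf (hLb ▸ nodup_bucket edges w)).mp (Or.inl hp)
      have hx := mem_bucket.mp (show x ∈ (pvInc edges).getD w [] by rw [hLb]; exact hm.1)
      have hy := mem_bucket.mp (show y ∈ (pvInc edges).getD w [] by rw [hLb]; exact hm.2.1)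
      exact ⟨hm.2.2, w, hx.2, hy.2⟩
    unfold pvShareP
    rcases h with h | h
    · obtain ⟨hne, w, hx, hy⟩ := key _ _ h
      exact ⟨hne, by omega⟩
    · obtain ⟨hne, w, hx, hy⟩ := key _ _ h
      exact ⟨Ne.symm hne, by omega⟩
  · rintro ⟨hne, hshare⟩
    have exw : ∃ w, ((pvE edges i).1 = w ∨ (pvE edges i).2 = w) ∧
        ((pvE edges j).1 = w ∨ (pvE edges j).2 = w) := by
      rcases hshare with h | h | h | h
      exacts [⟨(pvE edges j).1, Or.inl h, Or.inl rfl⟩,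
        ⟨(pvE edges j).2, Or.inl h, Or.inr rfl⟩,
        ⟨(pvE edges j).1, Or.inr h, Or.inl rfl⟩,
        ⟨(pvE edges j).2, Or.inr h, Or.inr rfl⟩]
    obtain ⟨w, hwi, hwj⟩ := exw
    have hg := get?_inc_of_mem (edges := edges) (w := w) (mem_flatL_fst hi hwi)
    have hL : (pvInc edges).getD w [] ∈ (pvInc edges).values := mem_values_inc.mpr ⟨w, hg⟩
    have hiL : i ∈ (pvInc edges).getD w [] := mem_bucket.mpr ⟨hi, hwi⟩
    have hjL : j ∈ (pvInc edges).getD w [] := mem_bucket.mpr ⟨hj, hwj⟩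
    rcases (mem_pvPairsOf (nodup_bucket edges w)).mpr ⟨hiL, hjL, hne⟩ with h | h
    · exact Or.inl (List.mem_flatMap.mpr ⟨_, hL, h⟩)
    · exact Or.inr (List.mem_flatMap.mpr ⟨_, hL, h⟩)

-- ---- assembling ----

lemma pvWf_adj0 (n : Nat) : pvWf n (pvAdj0 n) := by
  refine ⟨by simp [pvAdj0], ?_⟩
  intro i hi
  simp [pvAdj0, List.getD_eq_getElem?_getD, hi]

lemma matrix_ext {n : Nat} {m1 m2 : List (List Int)} (h1 : pvWf n m1) (h2 : pvWf n m2)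
    (h : ∀ i j, i < n → j < n → pvEntry m1 i j = pvEntry m2 i j) : m1 = m2 := by
  obtain ⟨hl1, hr1⟩ := h1
  obtain ⟨hl2, hr2⟩ := h2
  apply List.ext_getElem (by omega)
  intro i hi1 hi2
  have hin : i < n := by omega
  have e1 : m1[i] = m1.getD i [] := by simp [List.getD_eq_getElem?_getD, hi1]
  have e2 : m2[i] = m2.getD i [] := by simp [List.getD_eq_getElem?_getD, hi2]
  apply List.ext_getElem (by rw [e1, e2, hr1 i hin, hr2 i hin])
  intro j hj1 hj2
  have hjn : j < n := by rw [e1, hr1 i hin] at hj1; exact hj1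
  have := h i j hin hjn
  simp only [pvEntry] at this
  rw [← e1, ← e2] at this
  simpa [List.getD_eq_getElem?_getD, hj1, hj2] using this

lemma pvBounds_PA (edges : List (Int × Int)) :
    ∀ p ∈ pvPA edges, p.1 < edges.length ∧ p.2 < edges.length := by
  rintro ⟨a, b⟩ hp
  have := mem_pvPA.mp hp
  exact ⟨by omega, by omega⟩

lemma pvBounds_B (edges : List (Int × Int)) :
    ∀ p ∈ (pvInc edges).values.flatMap pvPairsOf,
      p.1 < edges.length ∧ p.2 < edges.length := by
  rintro ⟨a, b⟩ hp
  obtain ⟨L, hL, hpL⟩ := List.mem_flatMap.mp hp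
  obtain ⟨w, hw⟩ := mem_values_inc.mp hL
  have hLb := PySem.Dict.getD_of_get?_eq_some _ ([] : List Nat) hw
  have hm := mem_pvPairsOf_sub hpL
  have ha : a ∈ (pvInc edges).getD w [] := by rw [hLb]; exact hm.1
  have hb : b ∈ (pvInc edges).getD w [] := by rw [hLb]; exact hm.2
  exact ⟨(mem_bucket.mp ha).1, (mem_bucket.mp hb).1⟩

lemma pvE_mem {edges : List (Int × Int)} {i : Nat} (hi : i < edges.length) :
    pvE edges i ∈ edges := by
  have : pvE edges i = edges[i] := by
    simp [pvE, List.getD_eq_getElem?_getD, hi]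
  rw [this]
  exact List.getElem_mem hi

lemma pvSymA_iff (edges : List (Int × Int)) {i j : Nat} (hi : i < edges.length)
    (hj : j < edges.length) :
    ((i, j) ∈ pvPA edges ∨ (j, i) ∈ pvPA edges) ↔
      (i ≠ j ∧ pvRelP (pvE edges i) (pvE edges j)) := by
  rw [mem_pvPA, mem_pvPA]
  unfold pvRelP
  constructor
  · rintro (⟨h1, _, h3⟩ | ⟨h1, _, h3⟩)
    · exact ⟨by omega, h3⟩
    · exact ⟨by omega, by tauto⟩
  · rintro ⟨hne, hrel⟩
    rcases Nat.lt_or_ge i j with h | h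
    · exact Or.inl ⟨h, hj, hrel⟩
    · exact Or.inr ⟨by omega, hi, by tauto⟩

-- a Bool filter keeping more elements keeps at least as many
lemma pvFilter_len_mono {a : Type} (p q : a -> Bool) (l : List a)
    (h : forall x, x ∈ l -> p x = true -> q x = true) :
    (l.filter p).length ≤ (l.filter q).length := by
  induction l with
  | nil => simp
  | cons x t ih =>
    have ih' := ih (fun y hy => h y (List.mem_cons_of_mem _ hy))
    by_cases hp : p x = true
    · have hq := h x List.mem_cons_self hp
      simp [List.filter_cons, hp, hq]
      omega
    · simp only [List.filter_cons]
      rw [if_neg hp]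
      by_cases hq : q x = true
      · rw [if_pos hq]; simp; omega
      · rw [if_neg hq]; exact ih'

-- equal filter lengths with a pointwise implication force the reverse implication
lemma pvFilter_len_imp {a : Type} (p q : a -> Bool) (l : List a)
    (h : forall x, x ∈ l -> p x = true -> q x = true)
    (hlen : (l.filter q).length ≤ (l.filter p).length) :
    forall x, x ∈ l -> q x = true -> p x = true := by
  induction l with
  | nil => simp
  | cons y t ih =>
    simp only [List.filter_cons] at hlen
    have hmono := pvFilter_len_mono p q t (fun z hz => h z (List.mem_cons_of_mem _ hz))
    by_cases hp : p y = true
    · have hq := h y List.mem_cons_self hp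
      rw [if_pos hp, if_pos hq] at hlen
      simp only [List.length_cons] at hlen
      intro x hx hqx
      rcases List.mem_cons.mp hx with rfl | hx
      · exact hp
      · exact ih (fun z hz => h z (List.mem_cons_of_mem _ hz)) (by omega) x hx hqx
    · by_cases hq : q y = true
      · rw [if_neg hp, if_pos hq] at hlen
        simp only [List.length_cons] at hlen
        omega
      · rw [if_neg hp, if_neg hq] at hlen
        intro x hx hqx
        rcases List.mem_cons.mp hx with rfl | hx
        · exact absurd hqx hq
        · exact ih (fun z hz => h z (List.mem_cons_of_mem _ hz)) hlen x hx hqx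

-- under Pre_, A's coincidence relation collapses to the shared-vertex relation
lemma pvRel_to_share {edges : List (Int × Int)}
    (hpre : Pre_build_line_graph_adjacency edges) {e f : Int × Int}
    (he : e ∈ edges) (hf : f ∈ edges) (hr : pvRelP e f) : pvShareP e f := by
  obtain ⟨hrel5, hsh5⟩ := hpre e he
  have hmono : forall x, x ∈ edges -> pvShare e x = true -> pvRel e x = true := by
    intro x _ hx
    simp only [pvShare, decide_eq_true_eq] at hx
    simp only [pvRel, decide_eq_true_eq]
    tauto
  have := pvFilter_len_imp (fun f => pvShare e f) (fun f => pvRel e f) edges hmono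
    (by rw [hrel5, hsh5]) f hf
    (by simp only [pvRel, decide_eq_true_eq]; unfold pvRelP at hr; tauto)
  simp only [pvShare, decide_eq_true_eq] at this
  unfold pvShareP
  tauto

-- ===== VERDICT (by name: the statement is the Claim_ definition above) =====
theorem build_line_graph_adjacency_spec : Claim_equal_build_line_graph_adjacency := by
  intro edges _ hpre
  show build_line_graph_adjacency edges = build_line_graph_adjacency_alt edges
  rw [A_eq_foldl, B_eq_foldl]
  refine matrix_ext (n := edges.length)
    (pvWf_foldl_step _ (pvWf_adj0 _)) (pvWf_foldl_step _ (pvWf_adj0 _)) ?_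
  intro i j hi hj
  rw [pvEntry_foldl_step _ (pvWf_adj0 _) (pvBounds_PA edges) i j,
      pvEntry_foldl_step _ (pvWf_adj0 _) (pvBounds_B edges) i j]
  refine if_congr ?_ rfl rfl
  rw [pvSymA_iff edges hi hj, pvShare_iff edges hi hj]
  constructor
  · rintro ⟨hne, hrel⟩
    exact ⟨hne, pvRel_to_share hpre (pvE_mem hi) (pvE_mem hj) hrel⟩
  · rintro ⟨hne, hs⟩
    refine ⟨hne, ?_⟩
    unfold pvRelP
    unfold pvShareP at hs
    tauto
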